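-- pv_equiv track=rewrite | github.com/Xilinx-CNS/cns-sapi-ts | scripts/gen_onload_part.py | older_then
-- ===== SOURCE A (Python) =====
-- branch_seq = [["eol5"], ["eol6"], ["onload-7.0"], ["onload-7.1"],
--               ["eol7"], ["onload-8.0"]]
--
-- def older_then(branch1, branch2):
--     if not branch1:
--         branch1 = ""
--     if branch1 in (branch2, ""):
--         return False
--     for b in branch_seq:
--         if branch1 in b and branch2 in b:
--             return False
--         elif branch2 in b:
--             return False
--         elif branch1 in b:
--             return True
-- ===== SOURCE B (Python) =====
-- branch_seq = [["eol5"], ["eol6"], ["onload-7.0"], ["onload-7.1"],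
--               ["eol7"], ["onload-8.0"]]
--
-- def older_then(branch1, branch2):
--     if not branch1:
--         branch1 = ""
--     if branch1 in (branch2, ""):
--         return False
--     pos = {g[0]: i for i, g in enumerate(branch_seq)}
--     i1 = pos.get(branch1)
--     i2 = pos.get(branch2)
--     if i1 is None and i2 is None:
--         return None
--     if i2 is None:
--         return True
--     if i1 is None:
--         return False
--     return i1 < i2
-- ===== Notes on version B (the rewrite author's own statement) =====
-- stated objective: simpler
-- what changed: Replaces the short-circuit scan over branch_seq (three early returns inside the loop) by building a name->index map once and returning a single comparison of the two looked-up positions (None/True/False when a name is missing).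
import Mathlib
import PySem

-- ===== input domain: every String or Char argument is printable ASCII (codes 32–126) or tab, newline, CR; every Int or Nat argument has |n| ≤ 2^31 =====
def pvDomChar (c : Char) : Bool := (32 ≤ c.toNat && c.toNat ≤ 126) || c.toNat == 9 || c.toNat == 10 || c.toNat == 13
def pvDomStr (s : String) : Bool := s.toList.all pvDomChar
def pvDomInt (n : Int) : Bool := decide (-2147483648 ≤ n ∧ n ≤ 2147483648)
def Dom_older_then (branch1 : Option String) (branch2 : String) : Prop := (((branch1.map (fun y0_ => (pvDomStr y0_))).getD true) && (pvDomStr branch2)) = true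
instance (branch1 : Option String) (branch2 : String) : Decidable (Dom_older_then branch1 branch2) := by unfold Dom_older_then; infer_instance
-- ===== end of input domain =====

-- B replaces A's early-return scan over branch_seq by a name→index map and one comparison of the two looked-up positions (objective: simpler).

-- ===== PORT A =====
def branchSeqA : List (List String) := [["eol5"], ["eol6"], ["onload-7.0"], ["onload-7.1"], ["eol7"], ["onload-8.0"]]

-- the 'for b in branch_seq' loop with its three early returns; fall-through = None
def olderLoopA : List (List String) → String → String → Option Bool
  | [], _, _ => none
  | b :: rest, b1, b2 =>
    if b.contains b1 && b.contains b2 then some false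
    else if b.contains b2 then some false
    else if b.contains b1 then some true
    else olderLoopA rest b1 b2

def older_then (branch1 : Option String) (branch2 : String) : Option Bool :=
  -- 'if not branch1: branch1 = ""' — the falsy values of an Optional[str] are None and "" (and "" is left unchanged)
  let b1 : String := match branch1 with | none => "" | some s => s
  if b1 = branch2 ∨ b1 = "" then some false
  else olderLoopA branchSeqA b1 branch2

-- ===== PORT B =====
def branchSeqB : List (List String) := [["eol5"], ["eol6"], ["onload-7.0"], ["onload-7.1"], ["eol7"], ["onload-8.0"]]

def older_then_alt (branch1 : Option String) (branch2 : String) : Option Bool :=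
  let b1 : String := match branch1 with | none => "" | some s => s
  if b1 = branch2 ∨ b1 = "" then some false
  else
    -- pos = {g[0]: i for i, g in enumerate(branch_seq)}   (g[0]: every group in the literal branch_seq is nonempty, so headD is exact)
    let pos : PySem.Dict String Int :=
      (PySem.List.enumerate branchSeqB).foldl (fun d p => d.insert (p.2.headD "") p.1) PySem.Dict.empty
    match pos.get? b1, pos.get? branch2 with
    | none, none => none
    | some _, none => some true
    | none, some _ => some false
    | some i, some j => some (decide (i < j))

-- ===== PRECONDITION & SPEC =====
def Spec_older_then (branch1 : Option String) (branch2 : String) (out : Option Bool) : Prop := out = older_then_alt branch1 branch2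
instance (branch1 : Option String) (branch2 : String) (out : Option Bool) : Decidable (Spec_older_then branch1 branch2 out) := by unfold Spec_older_then; infer_instance

-- ===== CLAIM (what is proved, stated in full; the proofs are below) =====
def Claim_equal_older_then : Prop := ∀ (branch1 : Option String) (branch2 : String), Dom_older_then branch1 branch2 → Spec_older_then branch1 branch2 (older_then branch1 branch2)

-- ===== LEMMAS AND PROOFS =====
-- B's position dict, evaluated to a literal
lemma pos_eq : ((PySem.List.enumerate branchSeqB).foldl (fun d p => d.insert (p.2.headD "") p.1) PySem.Dict.empty : PySem.Dict String Int)
    = PySem.Dict.mk [("eol5",0),("eol6",1),("onload-7.0",2),("onload-7.1",3),("eol7",4),("onload-8.0",5)] := by decide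

lemma core_eq (b1 b2 : String) (h12 : b1 ≠ b2) :
    olderLoopA branchSeqA b1 b2 =
      (match (PySem.Dict.mk [("eol5",0),("eol6",1),("onload-7.0",2),("onload-7.1",3),("eol7",4),("onload-8.0",5)] : PySem.Dict String Int).get? b1,
             (PySem.Dict.mk [("eol5",0),("eol6",1),("onload-7.0",2),("onload-7.1",3),("eol7",4),("onload-8.0",5)] : PySem.Dict String Int).get? b2 with
      | none, none => none
      | some _, none => some true
      | none, some _ => some false
      | some i, some j => some (decide (i < j))) := by
  by_cases e1 : b1 = "eol5"
  · subst e1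
    by_cases f1 : b2 = "eol5"
    · subst f1
      first
      | decide
      | simp [h12, Ne.symm h12, branchSeqA, olderLoopA, PySem.Dict.get?_mk_cons, PySem.Dict.get?]
    by_cases f2 : b2 = "eol6"
    · subst f2
      first
      | decide
      | simp [h12, Ne.symm h12, branchSeqA, olderLoopA, PySem.Dict.get?_mk_cons, PySem.Dict.get?]
    by_cases f3 : b2 = "onload-7.0"
    · subst f3
      first
      | decide
      | simp [h12, Ne.symm h12, branchSeqA, olderLoopA, PySem.Dict.get?_mk_cons, PySem.Dict.get?]
    by_cases f4 : b2 = "onload-7.1"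
    · subst f4
      first
      | decide
      | simp [h12, Ne.symm h12, branchSeqA, olderLoopA, PySem.Dict.get?_mk_cons, PySem.Dict.get?]
    by_cases f5 : b2 = "eol7"
    · subst f5
      first
      | decide
      | simp [h12, Ne.symm h12, branchSeqA, olderLoopA, PySem.Dict.get?_mk_cons, PySem.Dict.get?]
    by_cases f6 : b2 = "onload-8.0"
    · subst f6
      first
      | decide
      | simp [h12, Ne.symm h12, branchSeqA, olderLoopA, PySem.Dict.get?_mk_cons, PySem.Dict.get?]
    first
    | decide
    | simp [h12, Ne.symm h12, branchSeqA, olderLoopA, PySem.Dict.get?_mk_cons, PySem.Dict.get?, f1, Ne.symm f1, f2, Ne.symm f2, f3, Ne.symm f3, f4, Ne.symm f4, f5, Ne.symm f5, f6, Ne.symm f6]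
  by_cases e2 : b1 = "eol6"
  · subst e2
    by_cases f1 : b2 = "eol5"
    · subst f1
      first
      | decide
      | simp [h12, Ne.symm h12, branchSeqA, olderLoopA, PySem.Dict.get?_mk_cons, PySem.Dict.get?]
    by_cases f2 : b2 = "eol6"
    · subst f2
      first
      | decide
      | simp [h12, Ne.symm h12, branchSeqA, olderLoopA, PySem.Dict.get?_mk_cons, PySem.Dict.get?]
    by_cases f3 : b2 = "onload-7.0"
    · subst f3
      first
      | decide
      | simp [h12, Ne.symm h12, branchSeqA, olderLoopA, PySem.Dict.get?_mk_cons, PySem.Dict.get?]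
    by_cases f4 : b2 = "onload-7.1"
    · subst f4
      first
      | decide
      | simp [h12, Ne.symm h12, branchSeqA, olderLoopA, PySem.Dict.get?_mk_cons, PySem.Dict.get?]
    by_cases f5 : b2 = "eol7"
    · subst f5
      first
      | decide
      | simp [h12, Ne.symm h12, branchSeqA, olderLoopA, PySem.Dict.get?_mk_cons, PySem.Dict.get?]
    by_cases f6 : b2 = "onload-8.0"
    · subst f6
      first
      | decide
      | simp [h12, Ne.symm h12, branchSeqA, olderLoopA, PySem.Dict.get?_mk_cons, PySem.Dict.get?]
    first
    | decide
    | simp [h12, Ne.symm h12, branchSeqA, olderLoopA, PySem.Dict.get?_mk_cons, PySem.Dict.get?, f1, Ne.symm f1, f2, Ne.symm f2, f3, Ne.symm f3, f4, Ne.symm f4, f5, Ne.symm f5, f6, Ne.symm f6]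
  by_cases e3 : b1 = "onload-7.0"
  · subst e3
    by_cases f1 : b2 = "eol5"
    · subst f1
      first
      | decide
      | simp [h12, Ne.symm h12, branchSeqA, olderLoopA, PySem.Dict.get?_mk_cons, PySem.Dict.get?]
    by_cases f2 : b2 = "eol6"
    · subst f2
      first
      | decide
      | simp [h12, Ne.symm h12, branchSeqA, olderLoopA, PySem.Dict.get?_mk_cons, PySem.Dict.get?]
    by_cases f3 : b2 = "onload-7.0"
    · subst f3
      first
      | decide
      | simp [h12, Ne.symm h12, branchSeqA, olderLoopA, PySem.Dict.get?_mk_cons, PySem.Dict.get?]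
    by_cases f4 : b2 = "onload-7.1"
    · subst f4
      first
      | decide
      | simp [h12, Ne.symm h12, branchSeqA, olderLoopA, PySem.Dict.get?_mk_cons, PySem.Dict.get?]
    by_cases f5 : b2 = "eol7"
    · subst f5
      first
      | decide
      | simp [h12, Ne.symm h12, branchSeqA, olderLoopA, PySem.Dict.get?_mk_cons, PySem.Dict.get?]
    by_cases f6 : b2 = "onload-8.0"
    · subst f6
      first
      | decide
      | simp [h12, Ne.symm h12, branchSeqA, olderLoopA, PySem.Dict.get?_mk_cons, PySem.Dict.get?]
    first
    | decide
    | simp [h12, Ne.symm h12, branchSeqA, olderLoopA, PySem.Dict.get?_mk_cons, PySem.Dict.get?, f1, Ne.symm f1, f2, Ne.symm f2, f3, Ne.symm f3, f4, Ne.symm f4, f5, Ne.symm f5, f6, Ne.symm f6]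
  by_cases e4 : b1 = "onload-7.1"
  · subst e4
    by_cases f1 : b2 = "eol5"
    · subst f1
      first
      | decide
      | simp [h12, Ne.symm h12, branchSeqA, olderLoopA, PySem.Dict.get?_mk_cons, PySem.Dict.get?]
    by_cases f2 : b2 = "eol6"
    · subst f2
      first
      | decide
      | simp [h12, Ne.symm h12, branchSeqA, olderLoopA, PySem.Dict.get?_mk_cons, PySem.Dict.get?]
    by_cases f3 : b2 = "onload-7.0"
    · subst f3
      first
      | decide
      | simp [h12, Ne.symm h12, branchSeqA, olderLoopA, PySem.Dict.get?_mk_cons, PySem.Dict.get?]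
    by_cases f4 : b2 = "onload-7.1"
    · subst f4
      first
      | decide
      | simp [h12, Ne.symm h12, branchSeqA, olderLoopA, PySem.Dict.get?_mk_cons, PySem.Dict.get?]
    by_cases f5 : b2 = "eol7"
    · subst f5
      first
      | decide
      | simp [h12, Ne.symm h12, branchSeqA, olderLoopA, PySem.Dict.get?_mk_cons, PySem.Dict.get?]
    by_cases f6 : b2 = "onload-8.0"
    · subst f6
      first
      | decide
      | simp [h12, Ne.symm h12, branchSeqA, olderLoopA, PySem.Dict.get?_mk_cons, PySem.Dict.get?]
    first
    | decide
    | simp [h12, Ne.symm h12, branchSeqA, olderLoopA, PySem.Dict.get?_mk_cons, PySem.Dict.get?, f1, Ne.symm f1, f2, Ne.symm f2, f3, Ne.symm f3, f4, Ne.symm f4, f5, Ne.symm f5, f6, Ne.symm f6]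
  by_cases e5 : b1 = "eol7"
  · subst e5
    by_cases f1 : b2 = "eol5"
    · subst f1
      first
      | decide
      | simp [h12, Ne.symm h12, branchSeqA, olderLoopA, PySem.Dict.get?_mk_cons, PySem.Dict.get?]
    by_cases f2 : b2 = "eol6"
    · subst f2
      first
      | decide
      | simp [h12, Ne.symm h12, branchSeqA, olderLoopA, PySem.Dict.get?_mk_cons, PySem.Dict.get?]
    by_cases f3 : b2 = "onload-7.0"
    · subst f3
      first
      | decide
      | simp [h12, Ne.symm h12, branchSeqA, olderLoopA, PySem.Dict.get?_mk_cons, PySem.Dict.get?]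
    by_cases f4 : b2 = "onload-7.1"
    · subst f4
      first
      | decide
      | simp [h12, Ne.symm h12, branchSeqA, olderLoopA, PySem.Dict.get?_mk_cons, PySem.Dict.get?]
    by_cases f5 : b2 = "eol7"
    · subst f5
      first
      | decide
      | simp [h12, Ne.symm h12, branchSeqA, olderLoopA, PySem.Dict.get?_mk_cons, PySem.Dict.get?]
    by_cases f6 : b2 = "onload-8.0"
    · subst f6
      first
      | decide
      | simp [h12, Ne.symm h12, branchSeqA, olderLoopA, PySem.Dict.get?_mk_cons, PySem.Dict.get?]
    first
    | decide
    | simp [h12, Ne.symm h12, branchSeqA, olderLoopA, PySem.Dict.get?_mk_cons, PySem.Dict.get?, f1, Ne.symm f1, f2, Ne.symm f2, f3, Ne.symm f3, f4, Ne.symm f4, f5, Ne.symm f5, f6, Ne.symm f6]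
  by_cases e6 : b1 = "onload-8.0"
  · subst e6
    by_cases f1 : b2 = "eol5"
    · subst f1
      first
      | decide
      | simp [h12, Ne.symm h12, branchSeqA, olderLoopA, PySem.Dict.get?_mk_cons, PySem.Dict.get?]
    by_cases f2 : b2 = "eol6"
    · subst f2
      first
      | decide
      | simp [h12, Ne.symm h12, branchSeqA, olderLoopA, PySem.Dict.get?_mk_cons, PySem.Dict.get?]
    by_cases f3 : b2 = "onload-7.0"
    · subst f3
      first
      | decide
      | simp [h12, Ne.symm h12, branchSeqA, olderLoopA, PySem.Dict.get?_mk_cons, PySem.Dict.get?]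
    by_cases f4 : b2 = "onload-7.1"
    · subst f4
      first
      | decide
      | simp [h12, Ne.symm h12, branchSeqA, olderLoopA, PySem.Dict.get?_mk_cons, PySem.Dict.get?]
    by_cases f5 : b2 = "eol7"
    · subst f5
      first
      | decide
      | simp [h12, Ne.symm h12, branchSeqA, olderLoopA, PySem.Dict.get?_mk_cons, PySem.Dict.get?]
    by_cases f6 : b2 = "onload-8.0"
    · subst f6
      first
      | decide
      | simp [h12, Ne.symm h12, branchSeqA, olderLoopA, PySem.Dict.get?_mk_cons, PySem.Dict.get?]
    first
    | decide
    | simp [h12, Ne.symm h12, branchSeqA, olderLoopA, PySem.Dict.get?_mk_cons, PySem.Dict.get?, f1, Ne.symm f1, f2, Ne.symm f2, f3, Ne.symm f3, f4, Ne.symm f4, f5, Ne.symm f5, f6, Ne.symm f6]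
  by_cases f1 : b2 = "eol5"
  · subst f1
    first
    | decide
    | simp [h12, Ne.symm h12, branchSeqA, olderLoopA, PySem.Dict.get?_mk_cons, PySem.Dict.get?, e1, Ne.symm e1, e2, Ne.symm e2, e3, Ne.symm e3, e4, Ne.symm e4, e5, Ne.symm e5, e6, Ne.symm e6]
  by_cases f2 : b2 = "eol6"
  · subst f2
    first
    | decide
    | simp [h12, Ne.symm h12, branchSeqA, olderLoopA, PySem.Dict.get?_mk_cons, PySem.Dict.get?, e1, Ne.symm e1, e2, Ne.symm e2, e3, Ne.symm e3, e4, Ne.symm e4, e5, Ne.symm e5, e6, Ne.symm e6]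
  by_cases f3 : b2 = "onload-7.0"
  · subst f3
    first
    | decide
    | simp [h12, Ne.symm h12, branchSeqA, olderLoopA, PySem.Dict.get?_mk_cons, PySem.Dict.get?, e1, Ne.symm e1, e2, Ne.symm e2, e3, Ne.symm e3, e4, Ne.symm e4, e5, Ne.symm e5, e6, Ne.symm e6]
  by_cases f4 : b2 = "onload-7.1"
  · subst f4
    first
    | decide
    | simp [h12, Ne.symm h12, branchSeqA, olderLoopA, PySem.Dict.get?_mk_cons, PySem.Dict.get?, e1, Ne.symm e1, e2, Ne.symm e2, e3, Ne.symm e3, e4, Ne.symm e4, e5, Ne.symm e5, e6, Ne.symm e6]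
  by_cases f5 : b2 = "eol7"
  · subst f5
    first
    | decide
    | simp [h12, Ne.symm h12, branchSeqA, olderLoopA, PySem.Dict.get?_mk_cons, PySem.Dict.get?, e1, Ne.symm e1, e2, Ne.symm e2, e3, Ne.symm e3, e4, Ne.symm e4, e5, Ne.symm e5, e6, Ne.symm e6]
  by_cases f6 : b2 = "onload-8.0"
  · subst f6
    first
    | decide
    | simp [h12, Ne.symm h12, branchSeqA, olderLoopA, PySem.Dict.get?_mk_cons, PySem.Dict.get?, e1, Ne.symm e1, e2, Ne.symm e2, e3, Ne.symm e3, e4, Ne.symm e4, e5, Ne.symm e5, e6, Ne.symm e6]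
  first
  | decide
  | simp [h12, Ne.symm h12, branchSeqA, olderLoopA, PySem.Dict.get?_mk_cons, PySem.Dict.get?, e1, Ne.symm e1, e2, Ne.symm e2, e3, Ne.symm e3, e4, Ne.symm e4, e5, Ne.symm e5, e6, Ne.symm e6, f1, Ne.symm f1, f2, Ne.symm f2, f3, Ne.symm f3, f4, Ne.symm f4, f5, Ne.symm f5, f6, Ne.symm f6]

-- ===== VERDICT (by name: the statement is the Claim_ definition above) =====
theorem older_then_spec : Claim_equal_older_then := by
  intro branch1 branch2 _
  unfold Spec_older_then older_then older_then_alt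
  rw [pos_eq]
  cases branch1 with
  | none =>
      simp only []
      by_cases h : ("" : String) = branch2 ∨ ("" : String) = "" <;> simp [h]
  | some s =>
      simp only []
      by_cases h : s = branch2 ∨ s = ""
      · simp [h]
      · simp only [if_neg h]
        exact core_eq s branch2 (by push Not at h; exact h.1)
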